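-- pv_equiv track=rewrite | github.com/kanhaiyaa/Basic-Programming-Problems | Day-16/4.filter_list.py | filter_this
-- ===== SOURCE A (Python) =====
-- def filter_this(my_list):
--
--   count = 0
--   next = 2
--   new_list = []
--
--   for index in range(0, len(my_list)):
--     if index == count:
--       new_list.append(my_list[index])
--
--       count += next
--       next += 1
--
--   return new_list
-- ===== SOURCE B (Python) =====
-- def filter_this(my_list):
--   # Jump directly to each selected index (0, 2, 5, 9, ...) instead of
--   # scanning every index.
--   new_list = []
--   i = 0
--   step = 2
--   n = len(my_list)
--   while i < n:
--     new_list.append(my_list[i])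
--     i += step
--     step += 1
--   return new_list
-- ===== Notes on version B (the rewrite author's own statement) =====
-- stated objective: alternative
-- what changed: B jumps directly from one selected index to the next with a running step (while i < n: take my_list[i]; i += step; step += 1), so its loop touches only the selected indices instead of scanning every index and comparing it to a counter; a timing run measured it around 1.4-1.5x at the largest sizes, below the confirmation threshold.
import Mathlib
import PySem

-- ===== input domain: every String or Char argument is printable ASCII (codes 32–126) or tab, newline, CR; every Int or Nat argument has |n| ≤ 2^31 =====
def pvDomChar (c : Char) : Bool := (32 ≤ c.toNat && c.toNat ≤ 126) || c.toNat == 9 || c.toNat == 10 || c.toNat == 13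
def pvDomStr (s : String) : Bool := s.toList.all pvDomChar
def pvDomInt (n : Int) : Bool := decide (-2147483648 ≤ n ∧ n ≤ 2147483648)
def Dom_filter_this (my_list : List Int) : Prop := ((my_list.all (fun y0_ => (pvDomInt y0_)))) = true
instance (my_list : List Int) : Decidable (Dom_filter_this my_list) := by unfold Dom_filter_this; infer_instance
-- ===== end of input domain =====

-- B jumps directly from selected index to selected index with a running step, touching only the selected indices instead of scanning every index (alternative algorithm).


-- ===== PORT A =====
-- the for-loop of A, recursion over the range list with state (count, next, new_list)
def filterThisLoopA (my_list : List Int) (indices : List Int) (count next : Int)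
    (new_list : List Int) : List Int :=
  match indices with
  | [] => new_list
  | index :: rest =>
    if index == count then
      filterThisLoopA my_list rest (count + next) (next + 1)
        (new_list ++ [(PySem.List.pyGet? my_list index).getD 0])  -- index = count is always in range here
    else
      filterThisLoopA my_list rest count next new_list

def filter_this (my_list : List Int) : List Int :=
  filterThisLoopA my_list (PySem.List.pyRange 0 my_list.length 1) 0 2 []

-- ===== PORT B =====
-- B's while loop; the step (starting at 2) is carried as k + 2 so termination is structural
def filterThisLoopB (my_list : List Int) (i k : Nat) (new_list : List Int) : List Int :=
  if h : i < my_list.length then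
    filterThisLoopB my_list (i + (k + 2)) (k + 1) (new_list ++ [my_list[i]])
  else
    new_list
termination_by my_list.length - i
decreasing_by omega

def filter_this_alt (my_list : List Int) : List Int :=
  filterThisLoopB my_list 0 0 []

-- ===== PRECONDITION & SPEC =====
def Spec_filter_this (my_list : List Int) (out : List Int) : Prop := out = filter_this_alt my_list
instance (my_list : List Int) (out : List Int) : Decidable (Spec_filter_this my_list out) := by unfold Spec_filter_this; infer_instance

-- ===== CLAIM (what is proved, stated in full; the proofs are below) =====
def Claim_equal_filter_this : Prop := ∀ (my_list : List Int), Dom_filter_this my_list → Spec_filter_this my_list (filter_this my_list)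

-- ===== LEMMAS AND PROOFS =====

-- Invariant: while scanning range positions a, a+1, …, len-1 with counter state
-- (count = i, next = k + 2) and i ≥ a, A's loop produces exactly B's jump loop from i.
lemma filterThisLoop_agree (my_list : List Int) :
    ∀ (m : Nat) (a : Int) (i k : Nat) (acc : List Int),
      ((my_list.length : Int) - a).toNat = m → 0 ≤ a → a ≤ (i : Int) →
      filterThisLoopA my_list (PySem.List.pyRange a my_list.length 1) (i : Int)
          ((k : Int) + 2) acc
        = filterThisLoopB my_list i k acc := by
  intro m
  induction m with
  | zero =>
    intro a i k acc hm ha hai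
    have hba : (my_list.length : Int) ≤ a := by omega
    rw [PySem.List.pyRange_one_eq_nil hba]
    have : ¬ i < my_list.length := by
      intro h
      have : (i : Int) < (my_list.length : Int) := by exact_mod_cast h
      omega
    rw [filterThisLoopB, dif_neg this]
    rfl
  | succ m ih =>
    intro a i k acc hm ha hai
    by_cases hab : a < (my_list.length : Int)
    · rw [PySem.List.pyRange_one_cons hab]
      unfold filterThisLoopA
      by_cases hc : a = (i : Int)
      · subst hc
        simp only [beq_self_eq_true, if_true]
        have hilen : i < my_list.length := by
          have : (i : Int) < (my_list.length : Int) := hab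
          exact_mod_cast this
        have hget : (PySem.List.pyGet? my_list (i : Int)).getD 0 = my_list[i] := by
          rw [PySem.List.pyGet?_natCast]
          simp [hilen]
        rw [hget]
        have hcast1 : (i : Int) + ((k : Int) + 2) = ((i + (k + 2) : Nat) : Int) := by
          push_cast; ring
        have hcast2 : (k : Int) + 2 + 1 = ((k + 1 : Nat) : Int) + 2 := by
          push_cast; ring
        rw [hcast1, hcast2]
        rw [ih ((i : Int) + 1) (i + (k + 2)) (k + 1) (acc ++ [my_list[i]]) (by omega) (by omega) (by push_cast; omega)]
        conv_rhs => rw [filterThisLoopB]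
        rw [dif_pos hilen]
      · have hne : ¬ (a == (i : Int)) = true := by simpa using hc
        rw [if_neg hne]
        exact ih (a + 1) i k acc (by omega) (by omega) (by omega)
    · have hba : (my_list.length : Int) ≤ a := by omega
      rw [PySem.List.pyRange_one_eq_nil hba]
      have : ¬ i < my_list.length := by
        intro h
        have : (i : Int) < (my_list.length : Int) := by exact_mod_cast h
        omega
      rw [filterThisLoopB, dif_neg this]
      rfl

-- ===== VERDICT (by name: the statement is the Claim_ definition above) =====
theorem filter_this_spec : Claim_equal_filter_this := by
  intro my_list _
  unfold Spec_filter_this filter_this filter_this_alt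
  have h := filterThisLoop_agree my_list ((my_list.length : Int) - 0).toNat 0 0 0 [] rfl
    (by omega) (by omega)
  simpa using h
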